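-- pv_equiv track=rewrite | github.com/pypi-data/pypi-mirror-34 | packages/tigereye/tigereye-0.2.1.tar.gz/tigereye-0.2.1/tigereye/util.py | args_pop
-- ===== SOURCE A (Python) =====
-- def args_pop(args, name, num_remove):
--     target = []
--     newargs = []
--     nitems = 0
--
--     for arg in args:
--         if nitems > 0:
--             target[-1].append(arg)
--             nitems -= 1
--         elif arg == name:
--             target.append([])
--             nitems = num_remove
--         else:
--             newargs.append(arg)
--
--     return newargs, target
-- ===== SOURCE B (Python) =====
-- def args_pop(args, name, num_remove):
--     args = list(args)
--     k = num_remove if num_remove > 0 else 0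
--     newargs = []
--     target = []
--     i = 0
--     n = len(args)
--     while i < n:
--         if args[i] == name:
--             target.append(args[i + 1:i + 1 + k])
--             i += 1 + k
--         else:
--             newargs.append(args[i])
--             i += 1
--     return newargs, target
-- ===== Notes on version B (the rewrite author's own statement) =====
-- stated objective: alternative
-- what changed: Replaces A's per-item countdown state machine with an index-jumping scan: at each marker B extracts the next max(num_remove,0) items as one slice and jumps the index past them, so no counter state is carried between iterations.
import Mathlib
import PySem

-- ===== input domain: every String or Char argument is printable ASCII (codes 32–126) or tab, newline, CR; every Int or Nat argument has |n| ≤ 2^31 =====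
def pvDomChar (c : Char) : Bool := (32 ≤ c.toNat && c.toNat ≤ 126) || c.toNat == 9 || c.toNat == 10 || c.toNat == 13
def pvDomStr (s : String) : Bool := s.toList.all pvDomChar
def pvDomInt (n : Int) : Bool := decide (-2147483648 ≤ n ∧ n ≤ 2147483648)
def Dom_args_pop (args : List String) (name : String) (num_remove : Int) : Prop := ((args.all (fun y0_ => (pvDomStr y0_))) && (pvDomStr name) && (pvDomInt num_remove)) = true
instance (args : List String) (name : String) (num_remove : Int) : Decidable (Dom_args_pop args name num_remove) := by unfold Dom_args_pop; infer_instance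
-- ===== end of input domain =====

-- B replaces A's per-item countdown state machine by slice extraction (take/drop jumps) per marker; alternative decomposition, same cost.


-- ===== PORT A =====
-- target[-1].append(arg): append to the last group (target is nonempty whenever nitems > 0)
def pvAppendLast (xs : List (List String)) (a : String) : List (List String) :=
  match xs with
  | [] => []
  | [g] => [g ++ [a]]
  | g :: rest => g :: pvAppendLast rest a

-- one step of A's for-loop body; state = (target, newargs, nitems)
def pvStepA (name : String) (num_remove : Int)
    (s : List (List String) × List String × Int) (arg : String) :
    List (List String) × List String × Int :=
  if s.2.2 > 0 then (pvAppendLast s.1 arg, s.2.1, s.2.2 - 1)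
  else if arg == name then (s.1 ++ [[]], s.2.1, num_remove)
  else (s.1, s.2.1 ++ [arg], s.2.2)

def args_pop (args : List String) (name : String) (num_remove : Int) : List String × List (List String) :=
  let r := args.foldl (pvStepA name num_remove) ([], [], 0)
  (r.2.1, r.1)

-- ===== PORT B =====
-- B's while loop: explicit index i into args; args[i+1:i+1+k] = (args.drop (i+1)).take k and
-- the jump i += 1+k (exact: all slice bounds and k are nonnegative; i < args.length guards args[i])
def pvLoopB (args : List String) (name : String) (k : Nat)
    (newargs : List String) (target : List (List String)) (i : Nat) :
    List String × List (List String) :=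
  if h : i < args.length then
    if args[i] == name then
      pvLoopB args name k newargs (target ++ [(args.drop (i + 1)).take k]) (i + 1 + k)
    else
      pvLoopB args name k (newargs ++ [args[i]]) target (i + 1)
  else (newargs, target)
termination_by args.length - i
decreasing_by all_goals omega

def args_pop_alt (args : List String) (name : String) (num_remove : Int) : List String × List (List String) :=
  -- k = num_remove if num_remove > 0 else 0
  pvLoopB args name num_remove.toNat [] [] 0

-- ===== PRECONDITION & SPEC =====
def Spec_args_pop (args : List String) (name : String) (num_remove : Int) (out : List String × List (List String)) : Prop := out = args_pop_alt args name num_remove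
instance (args : List String) (name : String) (num_remove : Int) (out : List String × List (List String)) : Decidable (Spec_args_pop args name num_remove out) := by unfold Spec_args_pop; infer_instance

-- ===== CLAIM (what is proved, stated in full; the proofs are below) =====
def Claim_equal_args_pop : Prop := ∀ (args : List String) (name : String) (num_remove : Int), Dom_args_pop args name num_remove → Spec_args_pop args name num_remove (args_pop args name num_remove)

-- ===== LEMMAS AND PROOFS =====

-- proof-side specification of B's loop: the same scan phrased on the remaining suffix
def pvLoopSpec (name : String) (k : Nat) (newargs : List String) (target : List (List String)) :
    List String → List String × List (List String)
  | [] => (newargs, target)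
  | h :: t =>
    if h == name then pvLoopSpec name k newargs (target ++ [t.take k]) (t.drop k)
    else pvLoopSpec name k (newargs ++ [h]) target t
termination_by l => l.length
decreasing_by all_goals simp

theorem pvLoopB_eq_spec (args : List String) (name : String) (k : Nat) :
    ∀ i newargs target, pvLoopB args name k newargs target i
      = pvLoopSpec name k newargs target (args.drop i) := by
  intro i
  induction hm : args.length - i using Nat.strong_induction_on generalizing i with
  | _ m ih =>
  intro newargs target
  by_cases h : i < args.length
  · have hdrop : args.drop i = args[i] :: args.drop (i + 1) := List.drop_eq_getElem_cons h
    rw [pvLoopB, dif_pos h, hdrop]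
    by_cases ha : args[i] == name
    · rw [if_pos ha]
      unfold pvLoopSpec
      rw [if_pos ha]
      have h1 : (args.drop (i + 1)).drop k = args.drop (i + 1 + k) := by
        rw [List.drop_drop]
      rw [h1]
      exact ih (args.length - (i + 1 + k)) (by omega) (i + 1 + k) rfl _ _
    · rw [if_neg ha]
      unfold pvLoopSpec
      rw [if_neg ha]
      exact ih (args.length - (i + 1)) (by omega) (i + 1) rfl _ _
  · rw [pvLoopB, dif_neg h, List.drop_eq_nil_of_le (by omega), pvLoopSpec]

theorem pvAppendLast_append (xs : List (List String)) (g : List String) (a : String) :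
    pvAppendLast (xs ++ [g]) a = xs ++ [g ++ [a]] := by
  induction xs with
  | nil => simp [pvAppendLast]
  | cons x rest ih =>
      cases rest with
      | nil => simp [pvAppendLast]
      | cons y ys => simp [pvAppendLast] at ih ⊢; exact ih

-- with a nonpositive counter, A's fold produces the same target/newargs as with counter 0
theorem pvFold_nonpos (name : String) (num_remove : Int) (l : List String)
    (c : Int) (hc : c ≤ 0) (target : List (List String)) (newargs : List String) :
    ((l.foldl (pvStepA name num_remove) (target, newargs, c)).1,
     (l.foldl (pvStepA name num_remove) (target, newargs, c)).2.1) =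
    ((l.foldl (pvStepA name num_remove) (target, newargs, 0)).1,
     (l.foldl (pvStepA name num_remove) (target, newargs, 0)).2.1) := by
  induction l generalizing target newargs with
  | nil => simp
  | cons a t ih =>
      by_cases ha : a == name
      · simp [List.foldl_cons, pvStepA, ha, not_lt.mpr hc]
      · simpa [List.foldl_cons, pvStepA, ha, not_lt.mpr hc] using ih _ _

-- consuming a positive counter c folds the next c items into the last group
theorem pvFold_consume (name : String) (num_remove : Int) (c : Nat) (l : List String)
    (g : List String) (target : List (List String)) (newargs : List String) :
    ((l.foldl (pvStepA name num_remove) (target ++ [g], newargs, (c : Int))).1,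
     (l.foldl (pvStepA name num_remove) (target ++ [g], newargs, (c : Int))).2.1) =
    (((l.drop c).foldl (pvStepA name num_remove) (target ++ [g ++ l.take c], newargs, 0)).1,
     ((l.drop c).foldl (pvStepA name num_remove) (target ++ [g ++ l.take c], newargs, 0)).2.1) := by
  induction c generalizing l g with
  | zero => simp
  | succ c ih =>
      cases l with
      | nil => simp
      | cons a t =>
          have h1 : pvStepA name num_remove (target ++ [g], newargs, ((c + 1 : Nat) : Int)) a
              = (target ++ [g ++ [a]], newargs, (c : Int)) := by
            simp [pvStepA, pvAppendLast_append]
          calc ((((a :: t).foldl (pvStepA name num_remove) (target ++ [g], newargs, ((c+1 : Nat) : Int)))).1,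
                (((a :: t).foldl (pvStepA name num_remove) (target ++ [g], newargs, ((c+1 : Nat) : Int)))).2.1)
              = ((t.foldl (pvStepA name num_remove) (target ++ [g ++ [a]], newargs, (c : Int))).1,
                 (t.foldl (pvStepA name num_remove) (target ++ [g ++ [a]], newargs, (c : Int))).2.1) := by
                rw [List.foldl_cons, h1]
            _ = _ := by simpa using ih t (g ++ [a])

-- main invariant: A's fold started with counter 0 computes B's loop, for any accumulators
theorem pvMain (name : String) (num_remove : Int) (l : List String)
    (target : List (List String)) (newargs : List String) :
    ((l.foldl (pvStepA name num_remove) (target, newargs, 0)).2.1,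
     (l.foldl (pvStepA name num_remove) (target, newargs, 0)).1) =
    pvLoopSpec name num_remove.toNat newargs target l := by
  induction hn : l.length using Nat.strong_induction_on generalizing l target newargs with
  | _ n ih =>
  cases l with
  | nil => simp [pvLoopSpec]
  | cons a t =>
    subst hn
    by_cases ha : a == name
    · rw [List.foldl_cons]
      have hstep : pvStepA name num_remove (target, newargs, 0) a
          = (target ++ [[]], newargs, num_remove) := by simp [pvStepA, ha]
      rw [hstep]
      by_cases hle : num_remove ≤ 0
      · -- k = 0: empty group, continue on t
        have hk : num_remove.toNat = 0 := Int.toNat_of_nonpos hle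
        have hne := pvFold_nonpos name num_remove t num_remove hle (target ++ [[]]) newargs
        have hrec := ih t.length (by simp) t (target ++ [[]]) newargs rfl
        rw [hk] at hrec
        simp [pvLoopSpec, ha, hk]
        rw [← hrec]
        exact congrArg (fun p => (p.2, p.1)) hne
      · have hpos : 0 < num_remove := by omega
        -- k = num_remove > 0: consume k items into the new group
        set k := num_remove.toNat with hk
        have hcast : (k : Int) = num_remove := Int.toNat_of_nonneg (le_of_lt hpos) ▸ rfl
        have hcons := pvFold_consume name num_remove k t [] (target) newargs
        rw [hcast] at hcons
        have hlen : (t.drop k).length < (a :: t).length := by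
          simp only [List.length_drop, List.length_cons]; omega
        have hrec := ih (t.drop k).length hlen (t.drop k) (target ++ [t.take k]) newargs rfl
        simp only [pvLoopSpec, ha, if_pos]
        rw [← hrec]
        simpa using congrArg (fun p => (p.2, p.1)) hcons
    · rw [List.foldl_cons]
      have hstep : pvStepA name num_remove (target, newargs, 0) a
          = (target, newargs ++ [a], 0) := by simp [pvStepA, ha]
      rw [hstep]
      have hrec := ih t.length (by simp) t target (newargs ++ [a]) rfl
      simp only [pvLoopSpec, ha]
      simpa [Bool.not_eq_true] using hrec

-- ===== VERDICT (by name: the statement is the Claim_ definition above) =====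
theorem args_pop_spec : Claim_equal_args_pop := by
  intro args name num_remove _
  unfold Spec_args_pop args_pop args_pop_alt
  rw [pvLoopB_eq_spec, List.drop_zero]
  simpa using pvMain name num_remove args [] []
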